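-- pv_equiv track=rewrite | github.com/GritCoder/LeetCode | 第十二周/使括号有效的最少添加.py | solution
-- ===== SOURCE A (Python) =====
-- def solution(s):
--     left = 0
--     need = 0
--     for c in s:
--         if c == '(':
--             # 对右括号的需求 + 1
--             need += 1
--         if c == ')':
--             # 对右括号的需求 - 1
--             need -= 1
--             if need == -1:
--                 need = 0
--                 # 需插入一个左括号
--                 left += 1
--     return left + need
-- ===== SOURCE B (Python) =====
-- def solution(s):
--     t = ''.join(c for c in s if c in '()')
--     while '()' in t:
--         t = t.replace('()', '')
--     return len(t)
-- ===== Notes on version B (the rewrite author's own statement) =====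
-- stated objective: alternative
-- what changed: Replaces the single-pass greedy counter by iterated pair elimination: drop non-parenthesis characters, repeatedly delete every '()' substring until none remains, and return the length of the residue (all unmatched brackets).
import Mathlib
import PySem

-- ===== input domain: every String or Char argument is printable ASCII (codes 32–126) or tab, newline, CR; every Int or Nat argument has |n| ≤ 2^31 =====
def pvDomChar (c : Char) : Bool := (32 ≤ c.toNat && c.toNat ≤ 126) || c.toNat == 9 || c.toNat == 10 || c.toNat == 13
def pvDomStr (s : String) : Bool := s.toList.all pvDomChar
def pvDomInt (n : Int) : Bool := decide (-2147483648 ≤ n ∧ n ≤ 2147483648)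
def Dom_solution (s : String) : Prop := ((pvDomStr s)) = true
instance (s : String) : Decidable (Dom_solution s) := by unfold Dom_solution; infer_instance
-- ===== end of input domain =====

-- B replaces A's greedy counter pass by iterated '()'-pair elimination on the parenthesis-only
-- substring; the residue is exactly the unmatched brackets, so its length is the answer
-- (alternative algorithm, same result).

-- ===== PORT A =====
-- one loop iteration of A over state (left, need)
def solutionStep (st : Int × Int) (c : Char) : Int × Int :=
  let need := if c = '(' then st.2 + 1 else st.2
  if c = ')' then
    let need := need - 1
    if need = -1 then (st.1 + 1, 0) else (st.1, need)
  else (st.1, need)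

def solution (s : String) : Int :=
  let st := s.toList.foldl solutionStep (0, 0)
  st.1 + st.2

-- ===== PORT B =====
-- c in '()'
def pvIsParen (c : Char) : Bool := c = '(' || c = ')'

-- one call of t.replace('()', ''): remove non-overlapping '()' occurrences, left to right
def onePass : List Char → List Char
  | [] => []
  | [c] => [c]
  | c1 :: c2 :: r => if c1 = '(' ∧ c2 = ')' then onePass r else c1 :: onePass (c2 :: r)

-- '()' in t
def hasPair : List Char → Bool
  | [] => false
  | [_] => false
  | c1 :: c2 :: r => (c1 = '(' && c2 = ')') || hasPair (c2 :: r)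

-- termination facts for the while loop (cited by elimFix's decreasing_by)
lemma onePass_length_le (l : List Char) : (onePass l).length ≤ l.length := by
  induction l using onePass.induct with
  | case1 => simp [onePass]
  | case2 c => simp [onePass]
  | case3 c1 c2 r h ih => simp only [onePass, if_pos h]; simp; omega
  | case4 c1 c2 r h ih => simp only [onePass, if_neg h]; simpa using ih

lemma onePass_length_lt (l : List Char) (h : hasPair l = true) :
    (onePass l).length < l.length := by
  induction l using onePass.induct with
  | case1 => simp [hasPair] at h
  | case2 c => simp [hasPair] at h
  | case3 c1 c2 r hp ih =>
    simp only [onePass, if_pos hp]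
    have := onePass_length_le r
    simp; omega
  | case4 c1 c2 r hp ih =>
    simp only [onePass, if_neg hp]
    have h' : hasPair (c2 :: r) = true := by
      simp only [hasPair, Bool.or_eq_true, Bool.and_eq_true, decide_eq_true_eq] at h
      rcases h with ⟨h1, h2⟩ | h
      · exact absurd ⟨h1, h2⟩ hp
      · exact h
    have h2 : (onePass (c2 :: r)).length < r.length + 1 := by simpa using ih h'
    simp; omega

-- while '()' in t: t = t.replace('()', '')
def elimFix (l : List Char) : List Char :=
  if h : hasPair l = true then elimFix (onePass l) else l
termination_by l.length
decreasing_by exact onePass_length_lt l h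

def solution_alt (s : String) : Int :=
  ((elimFix (s.toList.filter pvIsParen)).length : Int)

-- ===== PRECONDITION & SPEC =====
def Spec_solution (s : String) (out : Int) : Prop := out = solution_alt s
instance (s : String) (out : Int) : Decidable (Spec_solution s out) := by unfold Spec_solution; infer_instance

-- ===== CLAIM (what is proved, stated in full; the proofs are below) =====
def Claim_equal_solution : Prop := ∀ (s : String), Dom_solution s → Spec_solution s (solution s)

-- ===== LEMMAS AND PROOFS =====

-- A's step keeps the need-counter nonnegative
lemma step_nonneg (st : Int × Int) (c : Char) (h : 0 ≤ st.2) :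
    0 ≤ (solutionStep st c).2 := by
  simp only [solutionStep]
  split_ifs <;> simp <;> omega

-- processing a '()' pair from any reachable state is a no-op for A
lemma step_pair (st : Int × Int) (h : 0 ≤ st.2) :
    solutionStep (solutionStep st '(') ')' = st := by
  have e1 : solutionStep st '(' = (st.1, st.2 + 1) := by simp [solutionStep]
  have e2 : solutionStep (st.1, st.2 + 1) ')' = st := by
    simp [solutionStep]
    intro h1
    exact absurd h1 (by omega)
  rw [e1, e2]

-- A's fold is unchanged by one replace pass
lemma fold_onePass (l : List Char) : ∀ (st : Int × Int), 0 ≤ st.2 →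
    (onePass l).foldl solutionStep st = l.foldl solutionStep st := by
  induction l using onePass.induct with
  | case1 => intro st h; rfl
  | case2 c => intro st h; rfl
  | case3 c1 c2 r hp ih =>
    intro st h
    rw [show onePass (c1 :: c2 :: r) = onePass r from by rw [onePass, if_pos hp]]
    obtain ⟨h1, h2⟩ := hp
    subst h1; subst h2
    simp only [List.foldl_cons]
    rw [ih st h, step_pair st h]
  | case4 c1 c2 r hp ih =>
    intro st h
    rw [show onePass (c1 :: c2 :: r) = c1 :: onePass (c2 :: r) from by rw [onePass, if_neg hp]]
    simp only [List.foldl_cons]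
    exact ih _ (step_nonneg st c1 h)

-- hence unchanged by the whole elimination loop
lemma fold_elimFix (l : List Char) (st : Int × Int) (h : 0 ≤ st.2) :
    (elimFix l).foldl solutionStep st = l.foldl solutionStep st := by
  induction l using elimFix.induct with
  | case1 l hp ih => rw [elimFix, dif_pos hp, ih, fold_onePass l st h]
  | case2 l hp => rw [elimFix, dif_neg hp]

-- non-parenthesis characters do not change A's state
lemma fold_filter (l : List Char) : ∀ (st : Int × Int),
    (l.filter pvIsParen).foldl solutionStep st = l.foldl solutionStep st := by
  induction l with
  | nil => intro st; rfl
  | cons c r ih =>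
    intro st
    by_cases hp : pvIsParen c = true
    · rw [List.filter_cons_of_pos hp]
      simp only [List.foldl_cons]
      exact ih _
    · rw [List.filter_cons_of_neg (by simpa using hp)]
      have hc : c ≠ '(' ∧ c ≠ ')' := by
        constructor <;> intro hx <;> subst hx <;> simp [pvIsParen] at hp
      simp only [List.foldl_cons]
      rw [ih, show solutionStep st c = st from by simp [solutionStep, hc.1, hc.2]]

-- onePass yields a sublist, so elimFix does too (preserves "all parens")
lemma onePass_sublist (l : List Char) : (onePass l).Sublist l := by
  induction l using onePass.induct with
  | case1 => simp [onePass]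
  | case2 c => simp [onePass]
  | case3 c1 c2 r hp ih =>
    simp only [onePass, if_pos hp]
    exact ih.trans ((List.sublist_cons_self _ _).trans (List.sublist_cons_self _ _))
  | case4 c1 c2 r hp ih =>
    simp only [onePass, if_neg hp]
    exact ih.cons₂ c1

lemma elimFix_sublist (l : List Char) : (elimFix l).Sublist l := by
  induction l using elimFix.induct with
  | case1 l hp ih => rw [elimFix, dif_pos hp]; exact ih.trans (onePass_sublist l)
  | case2 l hp => rw [elimFix, dif_neg hp]

lemma elimFix_noPair (l : List Char) : hasPair (elimFix l) = false := by
  induction l using elimFix.induct with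
  | case1 l hp ih => rw [elimFix, dif_pos hp]; exact ih
  | case2 l hp => rw [elimFix, dif_neg hp]; simpa using hp

-- a parenthesis-only list with no '()' substring is ')'^a followed by '('^b
lemma noPair_shape (l : List Char) (hl : ∀ c ∈ l, pvIsParen c = true)
    (hp : hasPair l = false) :
    ∃ a b, l = List.replicate a ')' ++ List.replicate b '(' := by
  induction l with
  | nil => exact ⟨0, 0, rfl⟩
  | cons c r ih =>
    have hc : c = '(' ∨ c = ')' := by
      have := hl c (List.mem_cons_self)
      simp [pvIsParen] at this
      tauto
    have hr : hasPair r = false := by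
      cases r with
      | nil => rfl
      | cons c2 r2 =>
        simp only [hasPair, Bool.or_eq_false_iff] at hp
        exact hp.2
    obtain ⟨a, b, hab⟩ := ih (fun x hx => hl x (List.mem_cons_of_mem c hx)) hr
    rcases hc with hc | hc
    · subst hc
      -- '(' head: r cannot start with ')', so a = 0
      have ha : a = 0 := by
        by_contra h0
        obtain ⟨a', rfl⟩ : ∃ a', a = a' + 1 := ⟨a - 1, by omega⟩
        rw [hab] at hp
        simp [hasPair, List.replicate_succ] at hp
      subst ha
      simp at hab
      exact ⟨0, b + 1, by simp [hab, List.replicate_succ]⟩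
    · subst hc
      exact ⟨a + 1, b, by simp [hab, List.replicate_succ]⟩

-- A's fold on ')'^a '('^b from (0,0) is (a, b)
lemma fold_close (a : ℕ) : ∀ (left : Int),
    (List.replicate a ')').foldl solutionStep (left, 0) = (left + a, 0) := by
  induction a with
  | zero => intro left; simp
  | succ n ih =>
    intro left
    rw [List.replicate_succ, List.foldl_cons]
    have : solutionStep (left, 0) ')' = (left + 1, 0) := by simp [solutionStep]
    rw [this, ih]
    simp; ring

lemma fold_open (b : ℕ) : ∀ (st : Int × Int),
    (List.replicate b '(').foldl solutionStep st = (st.1, st.2 + b) := by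
  induction b with
  | zero => intro st; simp
  | succ n ih =>
    intro st
    rw [List.replicate_succ, List.foldl_cons]
    have : solutionStep st '(' = (st.1, st.2 + 1) := by simp [solutionStep]
    rw [this, ih]
    simp; ring

-- ===== VERDICT (by name: the statement is the Claim_ definition above) =====
theorem solution_spec : Claim_equal_solution := by
  intro s _
  unfold Spec_solution solution solution_alt
  set m := elimFix (s.toList.filter pvIsParen) with hm
  have hall : ∀ c ∈ m, pvIsParen c = true := by
    intro c hc
    have : c ∈ s.toList.filter pvIsParen :=
      (elimFix_sublist _).mem hc
    exact List.of_mem_filter this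
  obtain ⟨a, b, hshape⟩ := noPair_shape m hall (elimFix_noPair _)
  have hfold : s.toList.foldl solutionStep (0, 0) = ((a : Int), (b : Int)) := by
    rw [← fold_filter, ← fold_elimFix (s.toList.filter pvIsParen) (0, 0) le_rfl, ← hm,
      hshape, List.foldl_append, fold_close, fold_open]
    simp
  rw [hfold, hshape]
  simp
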